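-- pv_equiv track=rewrite | github.com/hieunguyentr/Smart-Voice-Home-Assistant | code/home_assistant_ai/pi_voice_runtime_openai.py | _is_news_another_request
-- ===== SOURCE A (Python) =====
-- def _is_news_another_request(normalized):
--     phrases = (
--         "another news",
--         "another one",
--         "different news",
--         "next news",
--         "more news",
--         "other news",
--         "random news",
--     )
--     return any(phrase in normalized for phrase in phrases)
-- ===== SOURCE B (Python) =====
-- def _is_news_another_request(normalized):
--     # "another one" is the only phrase not ending in "news"
--     if "another one" in normalized:
--         return True
--     # scan the occurrences of "news" left to right and test the preceding text
--     qualifiers = ("another ", "different ", "next ", "more ", "other ", "random ")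
--     start = 0
--     while True:
--         rel = normalized[start:].find("news")
--         if rel == -1:
--             return False
--         j = start + rel
--         if normalized[:j].endswith(qualifiers):
--             return True
--         start = j + 1
-- ===== Notes on version B (the rewrite author's own statement) =====
-- stated objective: alternative
-- what changed: Instead of seven independent substring membership scans, B checks 'another one' once and then scans the occurrences of the shared token 'news' left to right, testing whether the text before each occurrence ends with one of the six qualifier words.
import Mathlib
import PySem

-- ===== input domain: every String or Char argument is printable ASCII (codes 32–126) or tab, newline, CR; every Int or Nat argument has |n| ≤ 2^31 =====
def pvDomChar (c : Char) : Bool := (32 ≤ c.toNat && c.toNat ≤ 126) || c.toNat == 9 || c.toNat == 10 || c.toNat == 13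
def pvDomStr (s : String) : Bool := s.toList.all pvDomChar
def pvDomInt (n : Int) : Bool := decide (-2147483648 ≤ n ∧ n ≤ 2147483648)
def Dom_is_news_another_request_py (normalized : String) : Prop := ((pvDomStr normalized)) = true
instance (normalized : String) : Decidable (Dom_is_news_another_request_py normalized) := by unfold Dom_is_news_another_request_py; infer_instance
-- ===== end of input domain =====

-- B replaces seven independent substring scans with one pass over the occurrences of the shared token "news", checking the text before each occurrence for a qualifier word (alternative decomposition, same cost class).


-- ===== PORT A =====
-- A's phrase tuple
def pvPhrasesA : List String :=
  ["another news", "another one", "different news", "next news", "more news", "other news", "random news"]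

-- any(phrase in normalized for phrase in phrases)
def is_news_another_request_py (normalized : String) : Bool :=
  pvPhrasesA.any (fun phrase => PySem.Str.isIn phrase normalized)

-- ===== PORT B =====
-- B's qualifier tuple
def pvQualifiers : List String :=
  ["another ", "different ", "next ", "more ", "other ", "random "]

-- the while-loop of Source B: rel = normalized[start:].find("news") (a slice from a
-- nonnegative index is List.drop, exact here); normalized[:j] is List.take;
-- endswith with a tuple argument is "ends with any of them", i.e. List.any
def pvScan (s : List Char) (start : Nat) : Bool :=
  let rel := PySem.Chars.find (s.drop start) "news".toList
  if h : rel = -1 then false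
  else
    let j := start + rel.toNat
    if pvQualifiers.any (fun q => PySem.Chars.endswith (s.take j) q.toList) then true
    else pvScan s (j + 1)
termination_by s.length + 1 - start
decreasing_by
  have hinf : "news".toList <:+: s.drop start := (PySem.Chars.find_ne_neg_one_iff _ _).mp h
  have hlen : ("news".toList).length ≤ (s.drop start).length := hinf.length_le
  simp [List.length_drop] at hlen
  omega

def is_news_another_request_py_alt (normalized : String) : Bool :=
  if PySem.Str.isIn "another one" normalized then true
  else pvScan normalized.toList 0

-- ===== PRECONDITION & SPEC =====
def Spec_is_news_another_request_py (normalized : String) (out : Bool) : Prop := out = is_news_another_request_py_alt normalized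
instance (normalized : String) (out : Bool) : Decidable (Spec_is_news_another_request_py normalized out) := by unfold Spec_is_news_another_request_py; infer_instance

-- ===== CLAIM (what is proved, stated in full; the proofs are below) =====
def Claim_equal_is_news_another_request_py : Prop := ∀ (normalized : String), Dom_is_news_another_request_py normalized → Spec_is_news_another_request_py normalized (is_news_another_request_py normalized)

-- ===== LEMMAS AND PROOFS =====

-- decomposing an infix occurrence of p ++ n at the boundary between p and n
theorem pv_infix_append_iff (p n s : List Char) :
    (p ++ n) <:+: s ↔ ∃ j, n <+: s.drop j ∧ p <:+ s.take j := by
  constructor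
  · rintro ⟨a, b, rfl⟩
    refine ⟨a.length + p.length, ?_, ?_⟩
    · have h : a ++ (p ++ n) ++ b = (a ++ p) ++ (n ++ b) := by simp [List.append_assoc]
      rw [h]
      have hd := List.drop_left (l₁ := a ++ p) (l₂ := n ++ b)
      rw [List.length_append] at hd
      rw [hd]
      exact ⟨b, rfl⟩
    · have h : a ++ (p ++ n) ++ b = (a ++ p) ++ (n ++ b) := by simp [List.append_assoc]
      rw [h]
      have ht := List.take_left (l₁ := a ++ p) (l₂ := n ++ b)
      rw [List.length_append] at ht
      rw [ht]
      exact ⟨a, rfl⟩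
  · rintro ⟨j, ⟨v, hv⟩, ⟨u, hu⟩⟩
    refine ⟨u, v, ?_⟩
    have h : (u ++ p) ++ (n ++ v) = s := by rw [hu, hv, List.take_append_drop]
    simpa [List.append_assoc] using h

-- a phrase "q news" occurs iff some occurrence of "news" is preceded by "q "
theorem pv_phrase (q : List Char) (l : List Char) :
    PySem.Chars.isIn (q ++ "news".toList) l = true ↔
      ∃ j, "news".toList <+: l.drop j ∧ q <:+ l.take j := by
  rw [PySem.Chars.isIn_iff_infix, pv_infix_append_iff]

-- the loop returns true iff some occurrence of "news" at a position ≥ start is preceded by a qualifier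
theorem pvScan_iff (s : List Char) (start : Nat) :
    pvScan s start = true ↔
      ∃ j, start ≤ j ∧ "news".toList <+: s.drop j ∧
        (pvQualifiers.any (fun q => PySem.Chars.endswith (s.take j) q.toList)) = true := by
  fun_induction pvScan s start with
  | case1 start rel h =>
    simp only [Bool.false_eq_true, false_iff]
    rintro ⟨j, hj, hpre, -⟩
    have hni : ¬ "news".toList <:+: s.drop start := (PySem.Chars.find_eq_neg_one_iff _ _).mp h
    apply hni
    have hsfx : s.drop j <:+ s.drop start := by
      have hdd : (s.drop start).drop (j - start) = s.drop j := by
        rw [List.drop_drop]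
        congr 1
        omega
      exact hdd ▸ List.drop_suffix _ _
    exact (hpre.isInfix).trans hsfx.isInfix
  | case2 start rel h j hhit =>
    simp only [true_iff]
    have h0 : 0 ≤ PySem.Chars.find (s.drop start) "news".toList := by
      have := PySem.Chars.neg_one_le_find (s.drop start) "news".toList
      omega
    have hspec := PySem.Chars.find_spec (s := s.drop start) (sub := "news".toList) h0
    refine ⟨start + rel.toNat, by omega, ?_, hhit⟩
    have hdd : (s.drop start).drop rel.toNat = s.drop (start + rel.toNat) := List.drop_drop
    exact hdd ▸ hspec.1
  | case3 start rel h j hhit ih =>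
    rw [ih]
    constructor
    · rintro ⟨j', hj', hp, hq⟩
      exact ⟨j', by omega, hp, hq⟩
    · rintro ⟨j', hj', hp, hq⟩
      have h0 : 0 ≤ PySem.Chars.find (s.drop start) "news".toList := by
        have := PySem.Chars.neg_one_le_find (s.drop start) "news".toList
        omega
      have hspec := PySem.Chars.find_spec (s := s.drop start) (sub := "news".toList) h0
      refine ⟨j', ?_, hp, hq⟩
      by_contra hlt
      push Not at hlt
      rcases Nat.lt_or_ge j' (start + rel.toNat) with hcase | hcase
      · -- j' would be an earlier occurrence: contradicts minimality of find
        have hdd : (s.drop start).drop (j' - start) = s.drop j' := by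
          rw [List.drop_drop]
          congr 1
          omega
        exact hspec.2 (j' - start) (by omega) (hdd ▸ hp)
      · -- j' = start + rel.toNat: the qualifier test failed there
        have hje : j' = start + rel.toNat := by omega
        subst hje
        exact hhit hq
-- both programs agree on every string
set_option maxHeartbeats 1000000 in
theorem pv_main (s : String) :
    is_news_another_request_py s = is_news_another_request_py_alt s := by
  have e1 : "another news".toList = "another ".toList ++ "news".toList := by decide
  have e2 : "different news".toList = "different ".toList ++ "news".toList := by decide
  have e3 : "next news".toList = "next ".toList ++ "news".toList := by decide
  have e4 : "more news".toList = "more ".toList ++ "news".toList := by decide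
  have e5 : "other news".toList = "other ".toList ++ "news".toList := by decide
  have e6 : "random news".toList = "random ".toList ++ "news".toList := by decide
  rw [Bool.eq_iff_iff]
  by_cases hone : PySem.Str.isIn "another one" s = true
  · simp only [is_news_another_request_py, is_news_another_request_py_alt, pvPhrasesA,
      List.any_cons, List.any_nil, Bool.or_eq_true, hone, if_true]
    tauto
  · simp only [is_news_another_request_py, is_news_another_request_py_alt, pvPhrasesA,
      List.any_cons, List.any_nil, Bool.or_eq_true, hone, if_false,
      PySem.Str.isIn_eq, e1, e2, e3, e4, e5, e6, pv_phrase, pvScan_iff,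
      Nat.zero_le, true_and, pvQualifiers, PySem.Chars.endswith_iff,
      and_or_left, exists_or, Bool.false_eq_true, or_false]
    rw [PySem.Str.isIn_eq, PySem.Chars.isIn_iff_infix] at hone
    simp only [PySem.Chars.isIn_iff_infix, hone, false_or]

-- ===== VERDICT (by name: the statement is the Claim_ definition above) =====
theorem is_news_another_request_py_spec : Claim_equal_is_news_another_request_py := by
  intro s _
  unfold Spec_is_news_another_request_py
  exact pv_main s
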